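-- pv_equiv track=rewrite | github.com/rennydubs/auslan-nlp-sign-retrieval | src/nlp_features.py | _simple_phrase_extraction
-- ===== SOURCE A (Python) =====
-- from typing import List, Dict, Any, Tuple, Optional
--
-- def _simple_phrase_extraction(text: str) -> List[str]:
--     """Simple phrase extraction fallback."""
--     words = text.lower().split()
--     phrases = []
--
--     # Extract 2-grams and 3-grams
--     for i in range(len(words) - 1):
--         bigram = ' '.join(words[i:i+2])
--         phrases.append(bigram)
--
--         if i < len(words) - 2:
--             trigram = ' '.join(words[i:i+3])
--             phrases.append(trigram)
--
--     return phrases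
-- ===== SOURCE B (Python) =====
-- def _simple_phrase_extraction(text):
--     """Simple phrase extraction fallback."""
--     words = text.lower().split()
--     bigrams = [' '.join(p) for p in zip(words, words[1:])]
--     trigrams = [' '.join(t) for t in zip(words, words[1:], words[2:])]
--     paired = [g for pair in zip(bigrams, trigrams) for g in pair]
--     return paired + bigrams[len(trigrams):]
-- ===== Notes on version B (the rewrite author's own statement) =====
-- stated objective: alternative
-- what changed: Replaces A's single index loop (which slices and appends a bigram and conditionally a trigram per index) by building the bigram and trigram lists separately with zips and then interleaving them (pairwise flatten plus the leftover bigram).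
import Mathlib
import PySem

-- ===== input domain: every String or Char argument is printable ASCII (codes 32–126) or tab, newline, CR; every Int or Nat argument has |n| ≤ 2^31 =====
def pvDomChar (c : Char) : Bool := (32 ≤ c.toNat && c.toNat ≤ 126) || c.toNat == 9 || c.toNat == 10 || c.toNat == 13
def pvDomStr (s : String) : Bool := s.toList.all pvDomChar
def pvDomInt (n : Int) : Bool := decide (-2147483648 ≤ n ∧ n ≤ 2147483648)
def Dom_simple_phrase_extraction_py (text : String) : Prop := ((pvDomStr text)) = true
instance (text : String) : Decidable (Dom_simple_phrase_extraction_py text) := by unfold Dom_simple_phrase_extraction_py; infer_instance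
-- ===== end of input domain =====

-- B replaces A's single index loop by building the bigram and trigram lists separately
-- with zips and then interleaving them (objective: alternative decomposition, same cost).

-- ===== PORT A =====
def simple_phrase_extraction_py (text : String) : List String :=
  let words := PySem.Str.split₀ (PySem.Str.lower text)
  let n : Int := (words.length : Int)
  (PySem.List.pyRange 0 (n - 1) 1).foldl
    (fun phrases i =>
      let bigram := PySem.Str.join " " (PySem.List.slice words (some i) (some (i + 2)))
      let phrases := phrases ++ [bigram]
      if i < n - 2 then
        phrases ++ [PySem.Str.join " " (PySem.List.slice words (some i) (some (i + 3)))]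
      else phrases)
    []

-- ===== PORT B =====
def simple_phrase_extraction_py_alt (text : String) : List String :=
  let words := PySem.Str.split₀ (PySem.Str.lower text)
  let w1 := PySem.List.slice words (some 1) none     -- words[1:]
  let w2 := PySem.List.slice words (some 2) none     -- words[2:]
  let bigrams := (words.zip w1).map (fun p => PySem.Str.join " " [p.1, p.2])
  let trigrams := (words.zip (w1.zip w2)).map (fun t => PySem.Str.join " " [t.1, t.2.1, t.2.2])
  let paired := (bigrams.zip trigrams).flatMap (fun p => [p.1, p.2])
  paired ++ bigrams.drop trigrams.length

-- ===== PRECONDITION & SPEC =====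
def Spec_simple_phrase_extraction_py (text : String) (out : List String) : Prop := out = simple_phrase_extraction_py_alt text
instance (text : String) (out : List String) : Decidable (Spec_simple_phrase_extraction_py text out) := by unfold Spec_simple_phrase_extraction_py; infer_instance

-- ===== CLAIM (what is proved, stated in full; the proofs are below) =====
def Claim_equal_simple_phrase_extraction_py : Prop := ∀ (text : String), Dom_simple_phrase_extraction_py text → Spec_simple_phrase_extraction_py text (simple_phrase_extraction_py text)

-- ===== LEMMAS AND PROOFS =====

-- canonical interleaved n-gram list, recursion on the word list
def pvCanon : List String → List String
  | a :: b :: c :: rest =>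
      PySem.Str.join " " [a, b] :: PySem.Str.join " " [a, b, c] :: pvCanon (b :: c :: rest)
  | [a, b] => [PySem.Str.join " " [a, b]]
  | _ => []

theorem pvB_eq_canon (ws : List String) :
    (((ws.zip ws.tail).map (fun p => PySem.Str.join " " [p.1, p.2])).zip
        ((ws.zip (ws.tail.zip ws.tail.tail)).map
          (fun t => PySem.Str.join " " [t.1, t.2.1, t.2.2]))).flatMap (fun p => [p.1, p.2])
      ++ ((ws.zip ws.tail).map (fun p => PySem.Str.join " " [p.1, p.2])).drop
          (((ws.zip (ws.tail.zip ws.tail.tail)).map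
            (fun t => PySem.Str.join " " [t.1, t.2.1, t.2.2])).length)
    = pvCanon ws := by
  induction ws with
  | nil => simp [pvCanon]
  | cons a t ih =>
    match t with
    | [] => simp [pvCanon]
    | [b] => simp [pvCanon]
    | b :: c :: r =>
      simp only [List.tail_cons, List.zip_cons_cons, List.map_cons] at ih
      simp only [pvCanon, List.tail_cons, List.zip_cons_cons, List.map_cons, List.flatMap_cons,
        List.length_cons, List.drop_succ_cons]
      rw [← ih]
      simp

def pvH (ws : List String) (k : Nat) : List String :=
  PySem.Str.join " " ((ws.drop k).take 2) ::
    (if k + 2 < ws.length then [PySem.Str.join " " ((ws.drop k).take 3)] else [])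

theorem pvH_succ (a : String) (t : List String) (k : Nat) : pvH (a :: t) (k + 1) = pvH t k := by
  simp only [pvH, List.drop_succ_cons, List.length_cons]
  congr 1
  exact if_congr (by omega) rfl rfl

theorem pvG_nat (ws : List String) (k : Nat) :
    (PySem.Str.join " " (PySem.List.slice ws (some (k : Int)) (some ((k : Int) + 2))) ::
      if (k : Int) < (ws.length : Int) - 2 then
        [PySem.Str.join " " (PySem.List.slice ws (some (k : Int)) (some ((k : Int) + 3)))]
      else []) = pvH ws k := by
  have h2 : ((k : Int) + 2) = ((k + 2 : Nat) : Int) := by push_cast; ring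
  have h3 : ((k : Int) + 3) = ((k + 3 : Nat) : Int) := by push_cast; ring
  have e2 : k + 2 - k = 2 := by omega
  have e3 : k + 3 - k = 3 := by omega
  have hiff : ((k : Int) < (ws.length : Int) - 2) ↔ (k + 2 < ws.length) := by omega
  rw [pvH, h2, h3, PySem.List.slice_natCast, PySem.List.slice_natCast, e2, e3,
    if_congr hiff rfl rfl]

theorem pvRangeFlat (ws : List String) :
    (List.range (ws.length - 1)).flatMap (pvH ws) = pvCanon ws := by
  induction ws with
  | nil => simp [pvCanon]
  | cons a t ih =>
    match t with
    | [] => simp [pvCanon]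
    | b :: r =>
      have hl : (a :: b :: r).length - 1 = r.length + 1 := by simp
      rw [hl, List.range_succ_eq_map]
      simp only [List.flatMap_cons, List.flatMap_map, Nat.succ_eq_add_one, pvH_succ]
      have hr : (b :: r).length - 1 = r.length := by simp
      rw [show (List.range r.length).flatMap (pvH (b :: r))
            = (List.range ((b :: r).length - 1)).flatMap (pvH (b :: r)) from by rw [hr], ih]
      match r with
      | [] => simp [pvCanon, pvH]
      | c :: r' => simp [pvCanon, pvH]

theorem pvFold_body (ws : List String) (l : List Int) (acc : List String) :
    l.foldl
      (fun phrases i =>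
        let bigram := PySem.Str.join " " (PySem.List.slice ws (some i) (some (i + 2)))
        let phrases := phrases ++ [bigram]
        if i < (ws.length : Int) - 2 then
          phrases ++ [PySem.Str.join " " (PySem.List.slice ws (some i) (some (i + 3)))]
        else phrases)
      acc
    = acc ++ l.flatMap (fun i =>
        PySem.Str.join " " (PySem.List.slice ws (some i) (some (i + 2))) ::
          if i < (ws.length : Int) - 2 then
            [PySem.Str.join " " (PySem.List.slice ws (some i) (some (i + 3)))]
          else []) := by
  induction l generalizing acc with
  | nil => simp
  | cons x xs ih =>
    simp only [List.foldl_cons, List.flatMap_cons, ih]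
    split_ifs <;> simp

theorem pvA_eq_canon (ws : List String) :
    (PySem.List.pyRange 0 ((ws.length : Int) - 1) 1).foldl
      (fun phrases i =>
        let bigram := PySem.Str.join " " (PySem.List.slice ws (some i) (some (i + 2)))
        let phrases := phrases ++ [bigram]
        if i < (ws.length : Int) - 2 then
          phrases ++ [PySem.Str.join " " (PySem.List.slice ws (some i) (some (i + 3)))]
        else phrases)
      []
    = pvCanon ws := by
  rw [pvFold_body, List.nil_append, PySem.List.pyRange_one]
  have ht : (((ws.length : Int) - 1) - 0).toNat = ws.length - 1 := by omega
  rw [ht]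
  simp only [List.flatMap_map, zero_add, pvG_nat]
  exact pvRangeFlat ws

-- ===== VERDICT (by name: the statement is the Claim_ definition above) =====
theorem simple_phrase_extraction_py_spec : Claim_equal_simple_phrase_extraction_py := by
  intro text _
  unfold Spec_simple_phrase_extraction_py simple_phrase_extraction_py simple_phrase_extraction_py_alt
  simp only [PySem.List.slice_from_one]
  rw [show PySem.List.slice (PySem.Str.split₀ (PySem.Str.lower text)) (some 2) none
        = (PySem.Str.split₀ (PySem.Str.lower text)).tail.tail from by
    rw [PySem.List.slice_from]
    · simp [List.drop_drop, ← List.drop_one]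
    · norm_num]
  rw [pvA_eq_canon, pvB_eq_canon]
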